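-- pv_equiv track=rewrite | github.com/Kacperon/informatik | WDI/zestaw2/zad10.py | czywiel
-- ===== SOURCE A (Python) =====
-- def czywiel(n):
--     an=2
--     while an<=n:
--         zap=an
--         while zap<=n:
--             if zap==n:
--                 return True
--             zap+=zap
--         an=3*an+1
--     return(False)
-- ===== SOURCE B (Python) =====
-- def czywiel(n):
--     an = 2
--     while an <= n:
--         if n % an == 0 and (n // an) & (n // an - 1) == 0:
--             return True
--         an = 3 * an + 1
--     return False
-- ===== Notes on version B (the rewrite author's own statement) =====
-- stated objective: faster
-- what changed: For each an in the sequence 2, 3a+1, ... the inner doubling loop (scan of an, 2an, 4an, ... up to n) is replaced by a constant-time test: an divides n and the quotient is a power of two via the q & (q-1) == 0 bit trick.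
import Mathlib
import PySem

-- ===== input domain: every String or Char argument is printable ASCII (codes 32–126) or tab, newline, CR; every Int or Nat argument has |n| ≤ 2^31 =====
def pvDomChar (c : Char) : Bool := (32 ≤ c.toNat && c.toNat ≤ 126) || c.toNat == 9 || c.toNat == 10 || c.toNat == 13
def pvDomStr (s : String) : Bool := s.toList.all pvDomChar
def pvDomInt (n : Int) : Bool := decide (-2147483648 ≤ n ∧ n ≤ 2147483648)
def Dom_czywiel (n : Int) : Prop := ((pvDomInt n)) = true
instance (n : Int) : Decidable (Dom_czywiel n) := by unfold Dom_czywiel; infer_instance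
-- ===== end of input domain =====

-- B replaces A's inner doubling scan (an, 2an, 4an, … compared with n) by a constant-time
-- divisibility test plus the q & (q-1) == 0 power-of-two bit trick (objective: faster).

-- ===== PORT A =====
-- inner 'while zap<=n: if zap==n: return True; zap+=zap'; the '0 < zap' branch is a
-- totality guard only (Python diverges for zap ≤ 0; czywiel only calls it with zap = an ≥ 2)
def czyInner (n zap : Int) : Bool :=
  if _h : zap ≤ n then
    if zap = n then true
    else if _h2 : 0 < zap then czyInner n (zap + zap) else false
  else false
termination_by (n - zap).toNat
decreasing_by omega

-- outer 'while an<=n: …; an=3*an+1'; the '0 < an' branch is a totality guard only (an starts at 2)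
def czyOuter (n an : Int) : Bool :=
  if _h : an ≤ n then
    if czyInner n an then true
    else if _h2 : 0 < an then czyOuter n (3 * an + 1) else false
  else false
termination_by (n + 1 - an).toNat
decreasing_by omega

def czywiel (n : Int) : Bool := czyOuter n 2

-- ===== PORT B =====
-- 'while an<=n: if n % an == 0 and (n // an) & (n // an - 1) == 0: return True; an=3*an+1';
-- the '0 < an' branch is a totality guard only (an starts at 2)
def czyOuterB (n an : Int) : Bool :=
  if _h : an ≤ n then
    if PySem.Int.mod n an == 0 &&
        PySem.Int.band (PySem.Int.floordiv n an) (PySem.Int.floordiv n an - 1) == 0 then true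
    else if _h2 : 0 < an then czyOuterB n (3 * an + 1) else false
  else false
termination_by (n + 1 - an).toNat
decreasing_by omega

def czywiel_alt (n : Int) : Bool := czyOuterB n 2

-- ===== PRECONDITION & SPEC =====
def Spec_czywiel (n : Int) (out : Bool) : Prop := out = czywiel_alt n
instance (n : Int) (out : Bool) : Decidable (Spec_czywiel n out) := by unfold Spec_czywiel; infer_instance

-- ===== CLAIM (what is proved, stated in full; the proofs are below) =====
def Claim_equal_czywiel : Prop := ∀ (n : Int), Dom_czywiel n → Spec_czywiel n (czywiel n)

-- ===== LEMMAS AND PROOFS =====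

-- q & (q-1) = 0 characterises powers of two among the positive naturals
theorem nat_land_pred_eq_zero_iff (m : Nat) (h : 0 < m) :
    m &&& (m - 1) = 0 ↔ ∃ k : Nat, m = 2 ^ k := by
  induction m using Nat.strong_induction_on with
  | _ m IH =>
    rcases Nat.even_or_odd m with he | ho
    · obtain ⟨a, ha⟩ := he
      have hm : m = 2 * a := by omega
      have ha0 : 0 < a := by omega
      have h1 : m = Nat.bit false a := by rw [Nat.bit_false_apply]; omega
      have h2 : m - 1 = Nat.bit true (a - 1) := by rw [Nat.bit_true_apply]; omega
      have hland : m &&& (m - 1) = 2 * (a &&& (a - 1)) := by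
        conv_lhs => rw [h2, h1]
        rw [Nat.land_bit]
        simp [Nat.bit_false_apply]
      rw [hland]
      constructor
      · intro hz
        have hz' : a &&& (a - 1) = 0 := by omega
        obtain ⟨k, hk⟩ := (IH a (by omega) ha0).mp hz'
        exact ⟨k + 1, by rw [hm, hk]; ring⟩
      · rintro ⟨k, hk⟩
        rcases k with _ | k
        · omega
        · have hak : a = 2 ^ k := by rw [pow_succ] at hk; omega
          have := (IH a (by omega) ha0).mpr ⟨k, hak⟩
          omega
    · obtain ⟨a, ha⟩ := ho
      rcases Nat.eq_zero_or_pos a with ha0 | ha0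
      · have hm1 : m = 1 := by omega
        subst hm1
        constructor
        · intro _; exact ⟨0, rfl⟩
        · intro _; rfl
      · have h1 : m = Nat.bit true a := by rw [Nat.bit_true_apply]; omega
        have h2 : m - 1 = Nat.bit false a := by rw [Nat.bit_false_apply]; omega
        have hland : m &&& (m - 1) = 2 * a := by
          conv_lhs => rw [h2, h1]
          rw [Nat.land_bit]
          simp [Nat.bit_false_apply, Nat.and_self]
        rw [hland]
        constructor
        · intro hz; omega
        · rintro ⟨k, hk⟩
          rcases k with _ | k
          · omega
          · exfalso
            rw [pow_succ] at hk
            omega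

-- Int version, for 1 ≤ q
theorem int_band_pred_eq_zero_iff (q : Int) (h : 1 ≤ q) :
    PySem.Int.band q (q - 1) = 0 ↔ ∃ k : Nat, q = 2 ^ k := by
  obtain ⟨m, hm⟩ : ∃ m : Nat, q = (m : Int) := ⟨q.toNat, by omega⟩
  subst hm
  have hm1 : 1 ≤ m := by exact_mod_cast h
  have h2 : ((m : Int) - 1) = ((m - 1 : Nat) : Int) := by omega
  rw [h2, PySem.Int.band_natCast,
    show (0 : Int) = ((0 : Nat) : Int) from rfl, Int.natCast_inj,
    nat_land_pred_eq_zero_iff m (by omega)]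
  constructor
  · rintro ⟨k, hk⟩; exact ⟨k, by exact_mod_cast hk⟩
  · rintro ⟨k, hk⟩; exact ⟨k, by exact_mod_cast hk⟩

-- A's inner doubling loop finds n exactly when n = zap * 2^k for some k
theorem czyInner_iff (n zap : Int) (hz : 0 < zap) :
    czyInner n zap = true ↔ ∃ k : Nat, n = zap * 2 ^ k := by
  rw [czyInner.eq_def]
  by_cases h : zap ≤ n
  · rw [dif_pos h]
    by_cases he : zap = n
    · rw [if_pos he]
      constructor
      · intro _; exact ⟨0, by omega⟩
      · intro _; rfl
    · rw [if_neg he, dif_pos hz, czyInner_iff n (zap + zap) (by omega)]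
      constructor
      · rintro ⟨k, hk⟩; exact ⟨k + 1, by rw [hk]; ring⟩
      · rintro ⟨k, hk⟩
        rcases k with _ | k
        · exfalso; apply he; omega
        · exact ⟨k, by rw [hk]; ring⟩
  · rw [dif_neg h]
    simp only [Bool.false_eq_true, false_iff]
    rintro ⟨k, hk⟩
    have h1 : zap ≤ zap * 2 ^ k :=
      le_mul_of_one_le_right (le_of_lt hz) (one_le_pow₀ (by omega))
    rw [← hk] at h1
    omega
termination_by (n - zap).toNat
decreasing_by omega

-- B's constant-time test is the same predicate
theorem czyTestB_iff (n an : Int) (ha : 0 < an) (hle : an ≤ n) :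
    (PySem.Int.mod n an == 0 &&
      PySem.Int.band (PySem.Int.floordiv n an) (PySem.Int.floordiv n an - 1) == 0) = true
      ↔ ∃ k : Nat, n = an * 2 ^ k := by
  rw [Bool.and_eq_true, beq_iff_eq, beq_iff_eq, PySem.Int.mod_eq_zero_iff_dvd]
  constructor
  · rintro ⟨⟨c, hc⟩, hband⟩
    have hc1 : 1 ≤ c := by nlinarith
    have hq : PySem.Int.floordiv n an = c := by
      rw [PySem.Int.floordiv_eq_iff_of_pos ha]
      constructor <;> nlinarith
    rw [hq] at hband
    obtain ⟨k, hk⟩ := (int_band_pred_eq_zero_iff c hc1).mp hband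
    exact ⟨k, by rw [hc, hk]⟩
  · rintro ⟨k, hk⟩
    have hp : (1 : Int) ≤ 2 ^ k := one_le_pow₀ (by omega)
    have hq : PySem.Int.floordiv n an = 2 ^ k := by
      rw [PySem.Int.floordiv_eq_iff_of_pos ha]
      constructor <;> nlinarith
    refine ⟨⟨2 ^ k, hk⟩, ?_⟩
    rw [hq]
    exact (int_band_pred_eq_zero_iff _ hp).mpr ⟨k, rfl⟩

-- the two outer loops agree for every positive an
theorem czyOuter_eq_alt (n an : Int) (ha : 0 < an) : czyOuter n an = czyOuterB n an := by
  rw [czyOuter.eq_def, czyOuterB.eq_def]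
  by_cases h : an ≤ n
  · rw [dif_pos h, dif_pos h]
    have hcond : czyInner n an =
        (PySem.Int.mod n an == 0 &&
          PySem.Int.band (PySem.Int.floordiv n an) (PySem.Int.floordiv n an - 1) == 0) := by
      by_cases hp : ∃ k : Nat, n = an * 2 ^ k
      · rw [(czyInner_iff n an ha).mpr hp, (czyTestB_iff n an ha h).mpr hp]
      · rw [Bool.eq_false_iff.mpr fun hb => hp ((czyInner_iff n an ha).mp hb),
            Bool.eq_false_iff.mpr fun hb => hp ((czyTestB_iff n an ha h).mp hb)]
    rw [hcond]
    by_cases hc : (PySem.Int.mod n an == 0 &&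
        PySem.Int.band (PySem.Int.floordiv n an) (PySem.Int.floordiv n an - 1) == 0) = true
    · rw [if_pos hc, if_pos hc]
    · rw [if_neg hc, if_neg hc, dif_pos ha, dif_pos ha]
      exact czyOuter_eq_alt n (3 * an + 1) (by omega)
  · rw [dif_neg h, dif_neg h]
termination_by (n + 1 - an).toNat
decreasing_by omega

-- ===== VERDICT (by name: the statement is the Claim_ definition above) =====
theorem czywiel_spec : Claim_equal_czywiel := by
  intro n _
  unfold Spec_czywiel czywiel czywiel_alt
  exact czyOuter_eq_alt n 2 (by omega)
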